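-- pv_equiv track=rewrite | github.com/durgeshsingh90/test | collab.py | apply_length_checks
-- ===== SOURCE A (Python) =====
-- def apply_length_checks(json_obj):
--     """Apply length checks to JSON fields based on configuration."""
--     length_config = {
--         "LOWBIN": {"type": "CHAR", "length": 15},
--         "HIGHBIN": {"type": "CHAR", "length": 15},
--         "O_LEVEL": {"type": "NUMBER", "length": 1},
--         "STATUS": {"type": "CHAR", "length": 1},
--         "DESCRIPTION": {"type": "CHAR", "length": 50},
--         "DESTINATION": {"type": "CHAR", "length": 3},
--         "ENTITY_ID": {"type": "CHAR", "length": 1},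
--         "CARDPRODUCT": {"type": "CHAR", "length": 20},
--         "NETWORK_DATA": {"type": "CHAR", "length": 10},
--         "FILE_NAME": {"type": "CHAR", "length": 10},
--         "FILE_VERSION": {"type": "CHAR", "length": 5},
--         "FILE_DATE": {"type": "DATE", "length": None},
--         "COUNTRY_CODE": {"type": "CHAR", "length": 3},
--         "NETWORK_CONFIG": {"type": "CHAR", "length": 10},
--         "BIN_LENGTH": {"type": "NUMBER", "length": 2}
--     }
--
--     for key, value in json_obj.items():
--         if key in length_config:
--             config = length_config[key]
--             if config["type"] == "CHAR" and config["length"] is not None: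
--                 json_obj[key] = str(value).ljust(config["length"])[:config["length"]]
--             elif config["type"] == "NUMBER" and config["length"] is not None:
--                 json_obj[key] = str(value).zfill(config["length"])[:config["length"]]
--     return json_obj
-- ===== SOURCE B (Python) =====
-- def apply_length_checks(json_obj):
--     """Apply length checks to JSON fields based on configuration.
--
--     Two staged passes over the fixed width table instead of one pass with
--     library padding calls: stage 1 stringifies and truncates every configured
--     field to its width; stage 2 pads the fields that came up short (spaces on
--     the right for CHAR fields, zeros after an optional sign for the numeric
--     ones).  Mutates json_obj in place, like the original.
--     """
--     widths = {
--         "LOWBIN": 15, "HIGHBIN": 15, "O_LEVEL": 1, "STATUS": 1,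
--         "DESCRIPTION": 50, "DESTINATION": 3, "ENTITY_ID": 1,
--         "CARDPRODUCT": 20, "NETWORK_DATA": 10, "FILE_NAME": 10,
--         "FILE_VERSION": 5, "COUNTRY_CODE": 3, "NETWORK_CONFIG": 10,
--         "BIN_LENGTH": 2,
--     }
--     zero_padded = ("O_LEVEL", "BIN_LENGTH")
--
--     # stage 1: stringify and truncate every configured field
--     for key, width in widths.items():
--         if key in json_obj:
--             json_obj[key] = str(json_obj[key])[:width]
--
--     # stage 2: pad the fields that came up short
--     for key, width in widths.items():
--         if key in json_obj:
--             s = json_obj[key]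
--             gap = width - len(s)
--             if gap > 0:
--                 if key in zero_padded:
--                     if s[:1] in ('+', '-'):
--                         json_obj[key] = s[0] + '0' * gap + s[1:]
--                     else:
--                         json_obj[key] = '0' * gap + s
--                 else:
--                     json_obj[key] = s + ' ' * gap
--     return json_obj
-- ===== Notes on version B (the rewrite author's own statement) =====
-- stated objective: alternative
-- what changed: B replaces A's single pass (per-field config lookup + library ljust/zfill then slice) by two staged passes over a fixed width table: pass 1 stringifies and truncates every configured field, pass 2 pads the fields that came up short by explicit arithmetic (right spaces, or zeros inserted after an optional sign) with no padding built-ins; Pre_ excludes association lists with duplicate keys, which do not encode a Python dict (both Pythons receive the collapsed dict and agree, but the list-level update orders touch different occurrences).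
import Mathlib
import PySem

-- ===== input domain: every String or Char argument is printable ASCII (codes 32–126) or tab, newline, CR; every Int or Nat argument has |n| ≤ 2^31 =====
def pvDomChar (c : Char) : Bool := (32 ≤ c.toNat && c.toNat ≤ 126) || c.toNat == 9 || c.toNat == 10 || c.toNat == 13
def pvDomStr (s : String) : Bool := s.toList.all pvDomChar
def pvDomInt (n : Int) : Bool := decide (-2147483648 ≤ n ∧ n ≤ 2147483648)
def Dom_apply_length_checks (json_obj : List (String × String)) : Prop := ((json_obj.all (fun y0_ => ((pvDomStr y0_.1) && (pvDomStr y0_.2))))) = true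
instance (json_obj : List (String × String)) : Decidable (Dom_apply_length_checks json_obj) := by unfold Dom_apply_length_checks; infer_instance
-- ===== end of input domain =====

-- B replaces A's single pass (config lookup + ljust/zfill + slice per field) by two staged
-- passes over a fixed width table: truncate every configured field, then pad the short ones
-- by explicit arithmetic (alternative decomposition, not claimed faster). Both Pythons mutate
-- json_obj in place and return it; the equivalence proved here is about the returned mapping.

-- ===== PORT A =====
-- str.ljust (exact: pad on the right with spaces up to the width)
def pyLjust (s : String) (w : Int) : String :=
  String.ofList (s.toList ++ List.replicate (w.toNat - s.toList.length) ' ')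

-- Python dict assignment d[k] = w on the association list: overwrite the first match in place, else append
def dictSet : List (String × String) → String → String → List (String × String)
  | [], k, w => [(k, w)]
  | p :: rest, k, w => if p.1 == k then (k, w) :: rest else p :: dictSet rest k w

-- A's length_config dict literal
def lengthConfig : PySem.Dict String (String × Option Int) :=
  PySem.Dict.mk [
    ("LOWBIN", ("CHAR", some 15)), ("HIGHBIN", ("CHAR", some 15)),
    ("O_LEVEL", ("NUMBER", some 1)), ("STATUS", ("CHAR", some 1)),
    ("DESCRIPTION", ("CHAR", some 50)), ("DESTINATION", ("CHAR", some 3)),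
    ("ENTITY_ID", ("CHAR", some 1)), ("CARDPRODUCT", ("CHAR", some 20)),
    ("NETWORK_DATA", ("CHAR", some 10)), ("FILE_NAME", ("CHAR", some 10)),
    ("FILE_VERSION", ("CHAR", some 5)), ("FILE_DATE", ("DATE", none)),
    ("COUNTRY_CODE", ("CHAR", some 3)), ("NETWORK_CONFIG", ("CHAR", some 10)),
    ("BIN_LENGTH", ("NUMBER", some 2))]

-- the body of A's `for key, value in json_obj.items():` loop for one item kv
def aStep (d : List (String × String)) (kv : String × String) : List (String × String) :=
  match lengthConfig.get? kv.1 with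
  | none => d
  | some config =>
    if config.1 == "CHAR" then
      match config.2 with
      | some L => dictSet d kv.1 (PySem.Str.slice (pyLjust kv.2 L) none (some L))
      | none => d
    else if config.1 == "NUMBER" then
      match config.2 with
      | some L => dictSet d kv.1 (PySem.Str.slice (PySem.Str.zfill kv.2 L) none (some L))
      | none => d
    else d

def apply_length_checks (json_obj : List (String × String)) : List (String × String) :=
  json_obj.foldl aStep json_obj

-- ===== PORT B =====
-- B's width table and the tuple of zero-padded keys
def widths : List (String × Int) := [
  ("LOWBIN", 15), ("HIGHBIN", 15), ("O_LEVEL", 1), ("STATUS", 1),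
  ("DESCRIPTION", 50), ("DESTINATION", 3), ("ENTITY_ID", 1),
  ("CARDPRODUCT", 20), ("NETWORK_DATA", 10), ("FILE_NAME", 10),
  ("FILE_VERSION", 5), ("COUNTRY_CODE", 3), ("NETWORK_CONFIG", 10),
  ("BIN_LENGTH", 2)]

def zeroPadded : List String := ["O_LEVEL", "BIN_LENGTH"]

-- stage 1 body: json_obj[key] = str(json_obj[key])[:width]
def truncField (_k : String) (L : Int) (v : String) : String :=
  PySem.Str.slice v none (some L)

-- stage 2 body: gap = width - len(s); if gap > 0: pad with spaces, or zeros after an optional sign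
def padField (k : String) (L : Int) (s : String) : String :=
  if 0 < L - PySem.Str.len s then
    if zeroPadded.contains k then
      String.ofList (match s.toList with
        | c :: rest =>
            if c = '+' ∨ c = '-' then c :: (List.replicate (L - PySem.Str.len s).toNat '0' ++ rest)
            else List.replicate (L - PySem.Str.len s).toNat '0' ++ s.toList
        | [] => List.replicate (L - PySem.Str.len s).toNat '0')
    else String.ofList (s.toList ++ List.replicate (L - PySem.Str.len s).toNat ' ')
  else s

-- the shared loop shape of both passes: `for key, width in widths.items(): if key in json_obj: json_obj[key] = f(key, width, json_obj[key])`
def fieldStep (f : String → Int → String → String) (d : List (String × String)) (e : String × Int) : List (String × String) :=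
  match d.lookup e.1 with
  | some v => dictSet d e.1 (f e.1 e.2 v)
  | none => d

def fieldPass (f : String → Int → String → String) (d : List (String × String)) (cfg : List (String × Int)) : List (String × String) :=
  cfg.foldl (fieldStep f) d

def apply_length_checks_alt (json_obj : List (String × String)) : List (String × String) :=
  fieldPass padField (fieldPass truncField json_obj widths) widths

-- ===== PRECONDITION & SPEC =====
-- Pre_ excludes association lists with duplicate keys: they do not encode a Python dict (A's
-- and B's actual input type, where duplicates collapse before either runs and both agree),
-- and the two list-level update orders would touch different occurrences.
def Pre_apply_length_checks (json_obj : List (String × String)) : Prop :=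
  (json_obj.map Prod.fst).Nodup

instance (json_obj : List (String × String)) : Decidable (Pre_apply_length_checks json_obj) := by
  unfold Pre_apply_length_checks; infer_instance

def pvWitness_apply_length_checks : (List (String × String)) :=
  [("STATUS", "open"), ("NOTE", "x")]

def Spec_apply_length_checks (json_obj : List (String × String)) (out : List (String × String)) : Prop :=
  out = apply_length_checks_alt json_obj

instance (json_obj : List (String × String)) (out : List (String × String)) : Decidable (Spec_apply_length_checks json_obj out) := by
  unfold Spec_apply_length_checks; infer_instance

-- ===== CLAIM (what is proved, stated in full; the proofs are below) =====
def Claim_equal_apply_length_checks : Prop := ∀ (json_obj : List (String × String)), Dom_apply_length_checks json_obj → Pre_apply_length_checks json_obj → Spec_apply_length_checks json_obj (apply_length_checks json_obj)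

-- ===== LEMMAS AND PROOFS =====

-- the value A leaves at key k when the original value was v (total version of aStep's branch)
def aVal (k v : String) : String :=
  match lengthConfig.get? k with
  | none => v
  | some config =>
    if config.1 == "CHAR" then
      match config.2 with
      | some L => PySem.Str.slice (pyLjust v L) none (some L)
      | none => v
    else if config.1 == "NUMBER" then
      match config.2 with
      | some L => PySem.Str.slice (PySem.Str.zfill v L) none (some L)
      | none => v
    else v

-- the value B leaves at key k when the original value was v
def bVal (k v : String) : String :=
  match widths.lookup k with
  | some L => padField k L (truncField k L v)
  | none => v

lemma dictSet_append (d₁ : List (String × String)) (k v w : String)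
    (l : List (String × String)) (h : ∀ p ∈ d₁, (p.1 == k) = false) :
    dictSet (d₁ ++ (k, v) :: l) k w = d₁ ++ (k, w) :: l := by
  induction d₁ with
  | nil => simp [dictSet]
  | cons p d₁ ih =>
      have hp : (p.1 == k) = false := h p (by simp)
      simp [dictSet, hp, ih fun q hq => h q (by simp [hq])]

lemma aStep_concat (d₁ l : List (String × String)) (kv : String × String)
    (h : ∀ p ∈ d₁, (p.1 == kv.1) = false) :
    aStep (d₁ ++ kv :: l) kv = d₁ ++ (kv.1, aVal kv.1 kv.2) :: l := by
  obtain ⟨k, v⟩ := kv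
  unfold aStep aVal
  cases hc : lengthConfig.get? k with
  | none => rfl
  | some config =>
      by_cases h1 : config.1 == "CHAR" <;> by_cases h2 : config.1 == "NUMBER" <;>
        cases hL : config.2 <;>
        simp [h1, h2, hL, dictSet_append _ _ _ _ _ h]

lemma A_fold (l : List (String × String)) : ∀ d₁ : List (String × String),
    ((d₁ ++ l).map Prod.fst).Nodup →
    List.foldl aStep (d₁ ++ l) l = d₁ ++ l.map (fun kv => (kv.1, aVal kv.1 kv.2)) := by
  induction l with
  | nil => intro d₁ _; simp
  | cons kv l ih =>
      intro d₁ hnd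
      have hk : ∀ p ∈ d₁, (p.1 == kv.1) = false := by
        intro p hp
        have h2 : ∀ a ∈ d₁.map Prod.fst, ∀ b ∈ kv.1 :: l.map Prod.fst, a ≠ b :=
          (List.nodup_append.mp (by simpa using hnd)).2.2
        have hne : p.1 ≠ kv.1 := h2 p.1 (List.mem_map_of_mem hp) kv.1 (by simp)
        simpa using hne
      have step := aStep_concat d₁ l kv hk
      have hnd' : (((d₁ ++ [(kv.1, aVal kv.1 kv.2)]) ++ l).map Prod.fst).Nodup := by
        simpa using hnd
      calc List.foldl aStep (d₁ ++ kv :: l) (kv :: l)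
          = List.foldl aStep ((d₁ ++ [(kv.1, aVal kv.1 kv.2)]) ++ l) l := by
            simp [List.foldl_cons, step]
        _ = (d₁ ++ [(kv.1, aVal kv.1 kv.2)]) ++ l.map (fun kv => (kv.1, aVal kv.1 kv.2)) := ih _ hnd'
        _ = d₁ ++ (kv :: l).map (fun kv => (kv.1, aVal kv.1 kv.2)) := by simp

lemma lookup_none_of_not_mem {β : Type} (cfg : List (String × β)) (k : String)
    (h : k ∉ cfg.map Prod.fst) : cfg.lookup k = none := by
  induction cfg with
  | nil => rfl
  | cons e cfg ih =>
      have h1 : ¬ k = e.1 := by intro he; exact h (by simp [he])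
      have h2 : k ∉ cfg.map Prod.fst := fun hm => h (by simp [hm])
      simp [List.lookup, (by simpa using h1 : (k == e.1) = false), ih h2]

lemma lookup_of_mem (d : List (String × String)) (hnd : (d.map Prod.fst).Nodup)
    (kv : String × String) (h : kv ∈ d) : d.lookup kv.1 = some kv.2 := by
  induction d with
  | nil => cases h
  | cons p d ih =>
      rcases List.mem_cons.mp h with he | hm
      · subst he; simp [List.lookup]
      · have hne : kv.1 ≠ p.1 := by
          intro he
          exact (List.nodup_cons.mp hnd).1 (he ▸ List.mem_map_of_mem hm)
        simp [List.lookup, (by simpa using hne : (kv.1 == p.1) = false),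
          ih (List.nodup_cons.mp hnd).2 hm]

lemma dictSet_eq_map (d : List (String × String)) (hnd : (d.map Prod.fst).Nodup)
    (k w : String) (hkin : k ∈ d.map Prod.fst) :
    dictSet d k w = d.map (fun kv => if kv.1 == k then (k, w) else kv) := by
  induction d with
  | nil => cases hkin
  | cons p d ih =>
      by_cases hp : p.1 = k
      · have hmap : d.map (fun kv : String × String => if kv.1 = k then (k, w) else kv) = d := by
          conv_rhs => rw [← List.map_id d]
          refine List.map_congr_left ?_
          intro kv hkv
          have hne : kv.1 ≠ k := by
            intro he
            exact (List.nodup_cons.mp hnd).1 (hp ▸ he ▸ List.mem_map_of_mem hkv)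
          simp [hne]
        simp [dictSet, hp, hmap]
      · have hkin' : k ∈ d.map Prod.fst := by
          rcases List.mem_cons.mp hkin with he | hm
          · exact absurd he.symm hp
          · exact hm
        simp [dictSet, hp, ih (List.nodup_cons.mp hnd).2 hkin']

lemma fieldPass_eq_map (f : String → Int → String → String)
    (cfg : List (String × Int)) : ∀ d : List (String × String),
    (d.map Prod.fst).Nodup → (cfg.map Prod.fst).Nodup →
    fieldPass f d cfg
      = d.map (fun kv => match cfg.lookup kv.1 with
          | some L => (kv.1, f kv.1 L kv.2)
          | none => kv) := by
  induction cfg with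
  | nil => intro d _ _; simp [fieldPass, List.lookup]
  | cons e cfg ih =>
      intro d hnd hcfg
      cases hl : d.lookup e.1 with
      | none =>
          have hmem : ∀ kv ∈ d, kv.1 ≠ e.1 := by
            intro kv hkv he
            have := lookup_of_mem d hnd kv hkv
            rw [he, hl] at this; cases this
          have : fieldPass f d (e :: cfg) = fieldPass f d cfg := by
            simp [fieldPass, List.foldl_cons, fieldStep, hl]
          rw [this, ih d hnd (List.nodup_cons.mp hcfg).2]
          refine List.map_congr_left ?_
          intro kv hkv
          simp [List.lookup, (by simpa using hmem kv hkv : (kv.1 == e.1) = false)]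
      | some v =>
          have hkin : e.1 ∈ d.map Prod.fst := by
            by_contra hnm
            rw [lookup_none_of_not_mem d e.1 hnm] at hl
            cases hl
          have hset : fieldStep f d e
              = d.map (fun kv => if kv.1 == e.1 then (e.1, f e.1 e.2 v) else kv) := by
            simp [fieldStep, hl, dictSet_eq_map d hnd _ _ hkin]
          have hkeys : ((fieldStep f d e).map Prod.fst) = d.map Prod.fst := by
            rw [hset, List.map_map]
            refine List.map_congr_left ?_
            intro kv _
            by_cases h : kv.1 = e.1
            · simp [h]
            · simp [h]
          have hnd' : ((fieldStep f d e).map Prod.fst).Nodup := by rw [hkeys]; exact hnd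
          have hcfg' : cfg.lookup e.1 = none :=
            lookup_none_of_not_mem cfg e.1 (List.nodup_cons.mp hcfg).1
          have hfold : fieldPass f d (e :: cfg) = fieldPass f (fieldStep f d e) cfg := by
            simp [fieldPass, List.foldl_cons]
          rw [hfold, ih (fieldStep f d e) hnd' (List.nodup_cons.mp hcfg).2, hset,
            List.map_map]
          refine List.map_congr_left ?_
          intro kv hkv
          by_cases h : kv.1 == e.1
          · have hk : kv.1 = e.1 := by simpa using h
            have hv : v = kv.2 := by
              have := lookup_of_mem d hnd kv hkv
              rw [hk, hl] at this; injection this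
            simp [Function.comp, hk, hcfg', List.lookup, hv]
          · simp only [Function.comp_apply]
            simp [List.lookup, h]

-- truncate-then-pad-with-spaces equals A's ljust-then-truncate, for keys outside zero_padded
lemma padField_char (k : String) (hk : zeroPadded.contains k = false)
    (v : String) (L : Int) (hL : 0 ≤ L) :
    PySem.Str.slice (pyLjust v L) none (some L) = padField k L (truncField k L v) := by
  have hslice : ∀ s : String, (PySem.Str.slice s none (some L)).toList = s.toList.take L.toNat := by
    intro s
    rw [PySem.Str.toList_slice, PySem.Chars.slice_eq_listSlice, PySem.List.slice_to _ hL]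
  have ht : (truncField k L v).toList = v.toList.take L.toNat := hslice v
  have hlen : PySem.Str.len (truncField k L v) = ((min L.toNat v.toList.length : Nat) : Int) := by
    rw [PySem.Str.len_eq, ht, List.length_take]
  have hnk : ¬ (zeroPadded.contains k = true) := by rw [hk]; exact Bool.false_ne_true
  unfold padField
  by_cases h : v.toList.length < L.toNat
  · have hgap : (0:Int) < L - PySem.Str.len (truncField k L v) := by
      rw [hlen]; omega
    rw [if_pos hgap, if_neg hnk]
    apply String.toList_inj.mp
    rw [hslice, String.toList_ofList, ht]
    have htake : v.toList.take L.toNat = v.toList := List.take_of_length_le (by omega)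
    have hcnt : (L - PySem.Str.len (truncField k L v)).toNat = L.toNat - v.toList.length := by
      rw [hlen]; omega
    rw [htake, hcnt]
    simp only [pyLjust, String.toList_ofList]
    refine List.take_of_length_le ?_
    simp only [List.length_append, List.length_replicate]
    omega
  · have hgap : ¬ (0:Int) < L - PySem.Str.len (truncField k L v) := by
      rw [hlen]; omega
    rw [if_neg hgap]
    apply String.toList_inj.mp
    rw [hslice, ht]
    simp only [pyLjust, String.toList_ofList]
    have h0 : L.toNat - v.toList.length = 0 := by omega
    rw [h0]
    simp

-- truncate-then-zero-pad equals A's zfill-then-truncate, for the zero_padded keys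
lemma padField_num (k : String) (hk : zeroPadded.contains k = true)
    (v : String) (L : Int) (hL : 0 ≤ L) :
    PySem.Str.slice (PySem.Str.zfill v L) none (some L) = padField k L (truncField k L v) := by
  have hslice : ∀ s : String, (PySem.Str.slice s none (some L)).toList = s.toList.take L.toNat := by
    intro s
    rw [PySem.Str.toList_slice, PySem.Chars.slice_eq_listSlice, PySem.List.slice_to _ hL]
  have ht : (truncField k L v).toList = v.toList.take L.toNat := hslice v
  have hlen : PySem.Str.len (truncField k L v) = ((min L.toNat v.toList.length : Nat) : Int) := by
    rw [PySem.Str.len_eq, ht, List.length_take]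
  unfold padField
  by_cases h : v.toList.length < L.toNat
  · have hgap : (0:Int) < L - PySem.Str.len (truncField k L v) := by
      rw [hlen]; omega
    have htake : v.toList.take L.toNat = v.toList := List.take_of_length_le (by omega)
    have hcnt : (L - PySem.Str.len (truncField k L v)).toNat = L.toNat - v.toList.length := by
      rw [hlen]; omega
    rw [if_pos hgap, if_pos hk]
    apply String.toList_inj.mp
    rw [hslice, String.toList_ofList, PySem.Str.toList_zfill, ht, htake, hcnt]
    unfold PySem.Chars.zfill
    rw [if_neg (show ¬ L ≤ (v.toList.length : Int) by omega)]
    cases hv : v.toList with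
    | nil => simp
    | cons c rest =>
        have h' : rest.length + 1 ≤ L.toNat := by
          rw [hv] at h; simp only [List.length_cons] at h; omega
        by_cases hs : c = '+' ∨ c = '-'
        · simp only [if_pos hs]
          refine List.take_of_length_le ?_
          simp only [List.length_cons, List.length_append, List.length_replicate]
          omega
        · simp only [if_neg hs]
          refine List.take_of_length_le ?_
          simp only [List.length_cons, List.length_append, List.length_replicate]
          omega
  · have hgap : ¬ (0:Int) < L - PySem.Str.len (truncField k L v) := by
      rw [hlen]; omega
    rw [if_neg hgap]
    apply String.toList_inj.mp
    rw [hslice, ht, PySem.Str.toList_zfill]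
    unfold PySem.Chars.zfill
    rw [if_pos (show L ≤ (v.toList.length : Int) by omega)]

-- A's per-key transform equals B's (truncate stage composed with pad stage)
lemma val_eq (k v : String) : aVal k v = bVal k v := by
  by_cases h1 : k = "LOWBIN"
  · subst h1
    rw [show aVal "LOWBIN" v = PySem.Str.slice (pyLjust v 15) none (some 15) from by
          simp [aVal, lengthConfig, PySem.Dict.get?_mk_cons],
        show bVal "LOWBIN" v = padField "LOWBIN" 15 (truncField "LOWBIN" 15 v) from by
          simp [bVal, widths]]
    exact padField_char _ (by decide) v 15 (by norm_num)
  by_cases h2 : k = "HIGHBIN"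
  · subst h2
    rw [show aVal "HIGHBIN" v = PySem.Str.slice (pyLjust v 15) none (some 15) from by
          simp [aVal, lengthConfig, PySem.Dict.get?_mk_cons],
        show bVal "HIGHBIN" v = padField "HIGHBIN" 15 (truncField "HIGHBIN" 15 v) from by
          simp [bVal, widths, List.lookup]]
    exact padField_char _ (by decide) v 15 (by norm_num)
  by_cases h3 : k = "O_LEVEL"
  · subst h3
    rw [show aVal "O_LEVEL" v = PySem.Str.slice (PySem.Str.zfill v 1) none (some 1) from by
          simp [aVal, lengthConfig, PySem.Dict.get?_mk_cons],
        show bVal "O_LEVEL" v = padField "O_LEVEL" 1 (truncField "O_LEVEL" 1 v) from by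
          simp [bVal, widths, List.lookup]]
    exact padField_num _ (by decide) v 1 (by norm_num)
  by_cases h4 : k = "STATUS"
  · subst h4
    rw [show aVal "STATUS" v = PySem.Str.slice (pyLjust v 1) none (some 1) from by
          simp [aVal, lengthConfig, PySem.Dict.get?_mk_cons],
        show bVal "STATUS" v = padField "STATUS" 1 (truncField "STATUS" 1 v) from by
          simp [bVal, widths, List.lookup]]
    exact padField_char _ (by decide) v 1 (by norm_num)
  by_cases h5 : k = "DESCRIPTION"
  · subst h5
    rw [show aVal "DESCRIPTION" v = PySem.Str.slice (pyLjust v 50) none (some 50) from by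
          simp [aVal, lengthConfig, PySem.Dict.get?_mk_cons],
        show bVal "DESCRIPTION" v = padField "DESCRIPTION" 50 (truncField "DESCRIPTION" 50 v) from by
          simp [bVal, widths, List.lookup]]
    exact padField_char _ (by decide) v 50 (by norm_num)
  by_cases h6 : k = "DESTINATION"
  · subst h6
    rw [show aVal "DESTINATION" v = PySem.Str.slice (pyLjust v 3) none (some 3) from by
          simp [aVal, lengthConfig, PySem.Dict.get?_mk_cons],
        show bVal "DESTINATION" v = padField "DESTINATION" 3 (truncField "DESTINATION" 3 v) from by
          simp [bVal, widths, List.lookup]]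
    exact padField_char _ (by decide) v 3 (by norm_num)
  by_cases h7 : k = "ENTITY_ID"
  · subst h7
    rw [show aVal "ENTITY_ID" v = PySem.Str.slice (pyLjust v 1) none (some 1) from by
          simp [aVal, lengthConfig, PySem.Dict.get?_mk_cons],
        show bVal "ENTITY_ID" v = padField "ENTITY_ID" 1 (truncField "ENTITY_ID" 1 v) from by
          simp [bVal, widths, List.lookup]]
    exact padField_char _ (by decide) v 1 (by norm_num)
  by_cases h8 : k = "CARDPRODUCT"
  · subst h8
    rw [show aVal "CARDPRODUCT" v = PySem.Str.slice (pyLjust v 20) none (some 20) from by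
          simp [aVal, lengthConfig, PySem.Dict.get?_mk_cons],
        show bVal "CARDPRODUCT" v = padField "CARDPRODUCT" 20 (truncField "CARDPRODUCT" 20 v) from by
          simp [bVal, widths, List.lookup]]
    exact padField_char _ (by decide) v 20 (by norm_num)
  by_cases h9 : k = "NETWORK_DATA"
  · subst h9
    rw [show aVal "NETWORK_DATA" v = PySem.Str.slice (pyLjust v 10) none (some 10) from by
          simp [aVal, lengthConfig, PySem.Dict.get?_mk_cons],
        show bVal "NETWORK_DATA" v = padField "NETWORK_DATA" 10 (truncField "NETWORK_DATA" 10 v) from by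
          simp [bVal, widths, List.lookup]]
    exact padField_char _ (by decide) v 10 (by norm_num)
  by_cases h10 : k = "FILE_NAME"
  · subst h10
    rw [show aVal "FILE_NAME" v = PySem.Str.slice (pyLjust v 10) none (some 10) from by
          simp [aVal, lengthConfig, PySem.Dict.get?_mk_cons],
        show bVal "FILE_NAME" v = padField "FILE_NAME" 10 (truncField "FILE_NAME" 10 v) from by
          simp [bVal, widths, List.lookup]]
    exact padField_char _ (by decide) v 10 (by norm_num)
  by_cases h11 : k = "FILE_VERSION"
  · subst h11
    rw [show aVal "FILE_VERSION" v = PySem.Str.slice (pyLjust v 5) none (some 5) from by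
          simp [aVal, lengthConfig, PySem.Dict.get?_mk_cons],
        show bVal "FILE_VERSION" v = padField "FILE_VERSION" 5 (truncField "FILE_VERSION" 5 v) from by
          simp [bVal, widths, List.lookup]]
    exact padField_char _ (by decide) v 5 (by norm_num)
  by_cases h12 : k = "FILE_DATE"
  · subst h12
    simp [aVal, bVal,
      show lengthConfig.get? "FILE_DATE" = some ("DATE", none) from by
        simp [lengthConfig, PySem.Dict.get?_mk_cons],
      show widths.lookup "FILE_DATE" = none from by simp [widths]]
  by_cases h13 : k = "COUNTRY_CODE"
  · subst h13
    rw [show aVal "COUNTRY_CODE" v = PySem.Str.slice (pyLjust v 3) none (some 3) from by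
          simp [aVal, lengthConfig, PySem.Dict.get?_mk_cons],
        show bVal "COUNTRY_CODE" v = padField "COUNTRY_CODE" 3 (truncField "COUNTRY_CODE" 3 v) from by
          simp [bVal, widths, List.lookup]]
    exact padField_char _ (by decide) v 3 (by norm_num)
  by_cases h14 : k = "NETWORK_CONFIG"
  · subst h14
    rw [show aVal "NETWORK_CONFIG" v = PySem.Str.slice (pyLjust v 10) none (some 10) from by
          simp [aVal, lengthConfig, PySem.Dict.get?_mk_cons],
        show bVal "NETWORK_CONFIG" v = padField "NETWORK_CONFIG" 10 (truncField "NETWORK_CONFIG" 10 v) from by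
          simp [bVal, widths, List.lookup]]
    exact padField_char _ (by decide) v 10 (by norm_num)
  by_cases h15 : k = "BIN_LENGTH"
  · subst h15
    rw [show aVal "BIN_LENGTH" v = PySem.Str.slice (PySem.Str.zfill v 2) none (some 2) from by
          simp [aVal, lengthConfig, PySem.Dict.get?_mk_cons],
        show bVal "BIN_LENGTH" v = padField "BIN_LENGTH" 2 (truncField "BIN_LENGTH" 2 v) from by
          simp [bVal, widths, List.lookup]]
    exact padField_num _ (by decide) v 2 (by norm_num)
  · have hkeys : lengthConfig.keys = ["LOWBIN", "HIGHBIN", "O_LEVEL", "STATUS",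
      "DESCRIPTION", "DESTINATION", "ENTITY_ID", "CARDPRODUCT", "NETWORK_DATA",
      "FILE_NAME", "FILE_VERSION", "FILE_DATE", "COUNTRY_CODE", "NETWORK_CONFIG",
      "BIN_LENGTH"] := by simp [lengthConfig]
    have hA : lengthConfig.get? k = none := by
      rw [PySem.Dict.get?_eq_none_iff_not_mem_keys, hkeys]
      simp [h1, h2, h3, h4, h5, h6, h7, h8, h9, h10, h11, h12, h13, h14, h15]
    have hB : widths.lookup k = none := by
      refine lookup_none_of_not_mem widths k ?_
      simp [widths, h1, h2, h3, h4, h5, h6, h7, h8, h9, h10, h11, h13, h14, h15]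
    simp [aVal, bVal, hA, hB]

-- ===== VERDICT (by name: the statement is the Claim_ definition above) =====
theorem apply_length_checks_spec : Claim_equal_apply_length_checks := by
  intro j _ hpre
  unfold Spec_apply_length_checks
  have hA : apply_length_checks j = j.map (fun kv => (kv.1, aVal kv.1 kv.2)) := by
    simpa [apply_length_checks] using A_fold j [] (by simpa using hpre)
  have hwid : (widths.map Prod.fst).Nodup := by simp [widths]
  have h1 : fieldPass truncField j widths
      = j.map (fun kv => match widths.lookup kv.1 with
          | some L => (kv.1, truncField kv.1 L kv.2)
          | none => kv) := fieldPass_eq_map truncField widths j hpre hwid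
  have hkeys : ((fieldPass truncField j widths).map Prod.fst) = j.map Prod.fst := by
    rw [h1, List.map_map]
    refine List.map_congr_left ?_
    intro kv _
    cases h : widths.lookup kv.1 <;> simp [h]
  have h2 : apply_length_checks_alt j
      = (fieldPass truncField j widths).map (fun kv => match widths.lookup kv.1 with
          | some L => (kv.1, padField kv.1 L kv.2)
          | none => kv) := by
    unfold apply_length_checks_alt
    exact fieldPass_eq_map padField widths _ (hkeys ▸ hpre) hwid
  rw [hA, h2, h1, List.map_map]
  refine List.map_congr_left ?_
  intro kv _
  have := val_eq kv.1 kv.2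
  simp only [Function.comp_apply]
  cases h : widths.lookup kv.1 with
  | none => simp [bVal, h] at this; simp [h, this]
  | some L => simp [bVal, h, truncField] at this; simp [h, truncField, this]
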